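-- pv_equiv track=rewrite | github.com/JuanJie3/SAE | SAE_Bio_Python/biology.py | arn_to_codons
-- ===== SOURCE A (Python) =====
-- def arn_to_codons(arn):
--     '''
--     arn_to_codons prends en paramètre une chaîne de caractères correspondant
--     à de l'ARN et découpant cet ARN en codons. La fonction doit
--     retourner un tableau contenant la liste des codons.
--     '''
--
--     t = []
--     codon = ""
--     compteur = 0
--
--     for lettre in arn :
--         codon += lettre
--         compteur += 1
--
--         if compteur == 3:
--             t.append(codon)
--             compteur = 0
--             codon = ""
--     return t
-- ===== SOURCE B (Python) =====
-- def arn_to_codons(arn):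
--     n = len(arn) - len(arn) % 3
--     return [arn[i:i+3] for i in range(0, n, 3)]
-- ===== Notes on version B (the rewrite author's own statement) =====
-- stated objective: idiomatic
-- what changed: Replaces the character-accumulating loop with a running codon buffer and counter by an index-strided slicing comprehension over range(0, len - len%3, 3).
import Mathlib
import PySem

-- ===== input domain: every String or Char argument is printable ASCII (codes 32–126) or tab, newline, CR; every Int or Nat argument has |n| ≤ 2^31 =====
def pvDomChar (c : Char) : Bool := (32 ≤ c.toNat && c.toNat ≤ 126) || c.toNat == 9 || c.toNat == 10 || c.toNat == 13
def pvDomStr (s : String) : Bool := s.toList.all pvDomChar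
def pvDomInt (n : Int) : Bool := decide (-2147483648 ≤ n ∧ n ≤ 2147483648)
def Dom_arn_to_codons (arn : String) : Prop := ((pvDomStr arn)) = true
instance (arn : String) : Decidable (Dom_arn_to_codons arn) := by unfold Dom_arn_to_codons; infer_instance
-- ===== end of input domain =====

-- B replaces A's codon-buffer-and-counter loop by slicing at strided indices; objective: idiomatic.
-- ===== PORT A =====
-- loop body of A: state = (t, codon chars, compteur)
def arnStepA (s : List String × List Char × Int) (lettre : Char) : List String × List Char × Int :=
  let codon := s.2.1 ++ [lettre]
  let compteur := s.2.2 + 1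
  if compteur = 3 then (s.1 ++ [String.ofList codon], [], 0) else (s.1, codon, compteur)

def arn_to_codons (arn : String) : List String :=
  (arn.toList.foldl arnStepA ([], [], 0)).1

-- ===== PORT B =====
def arn_to_codons_alt (arn : String) : List String :=
  let n : Int := PySem.Str.len arn - PySem.Int.mod (PySem.Str.len arn) 3
  (PySem.List.pyRange 0 n 3).map (fun i => PySem.Str.slice arn (some i) (some (i + 3)))

-- ===== PRECONDITION & SPEC =====
def Spec_arn_to_codons (arn : String) (out : List String) : Prop := out = arn_to_codons_alt arn
instance (arn : String) (out : List String) : Decidable (Spec_arn_to_codons arn out) := by unfold Spec_arn_to_codons; infer_instance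

-- ===== CLAIM (what is proved, stated in full; the proofs are below) =====
def Claim_equal_arn_to_codons : Prop := ∀ (arn : String), Dom_arn_to_codons arn → Spec_arn_to_codons arn (arn_to_codons arn)

-- ===== LEMMAS AND PROOFS =====
-- reference chunking both sides are proved equal to
def chunk3 : List Char → List String
  | a :: b :: c :: rest => String.ofList [a, b, c] :: chunk3 rest
  | _ => []

lemma foldA_eq (cs : List Char) : ∀ t : List String,
    (cs.foldl arnStepA (t, [], 0)).1 = t ++ chunk3 cs := by
  fun_induction chunk3 cs with
  | case1 a b c rest ih =>
      intro t
      simp [arnStepA, ih, List.append_assoc]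
  | case2 cs h =>
      intro t
      rcases cs with _ | ⟨a, _ | ⟨b, _ | ⟨c, rest⟩⟩⟩
      · simp
      · simp [arnStepA]
      · simp [arnStepA]
      · exact absurd rfl (h a b c rest)

lemma rangeMap_eq (cs : List Char) :
    (List.range (cs.length / 3)).map
      (fun k => String.ofList ((cs.drop (3 * k)).take 3)) = chunk3 cs := by
  fun_induction chunk3 cs with
  | case1 a b c rest ih =>
      have hlen : (a :: b :: c :: rest).length / 3 = rest.length / 3 + 1 := by
        simp [List.length_cons]; omega
      have hdrop : ∀ k : Nat, List.drop (3 * (k + 1)) (a :: b :: c :: rest) = List.drop (3 * k) rest := by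
        intro k
        rw [show 3 * (k + 1) = 3 + 3 * k from by ring, ← List.drop_drop]
        rfl
      rw [hlen, List.range_succ_eq_map, List.map_cons, List.map_map, ← ih]
      simp [Function.comp_def, hdrop]
  | case2 cs h =>
      rcases cs with _ | ⟨a, _ | ⟨b, _ | ⟨c, rest⟩⟩⟩
      · simp
      · simp
      · simp
      · exact absurd rfl (h a b c rest)

lemma altList_eq (cs : List Char) :
    (PySem.List.pyRange 0 ((cs.length : Int) - PySem.Int.mod (cs.length : Int) 3) 3).map
      (fun i => String.ofList (PySem.List.slice cs (some i) (some (i + 3)))) = chunk3 cs := by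
  obtain ⟨q, r, hmq, hr, hqdiv⟩ :
      ∃ q r, cs.length = 3 * q + r ∧ r < 3 ∧ q = cs.length / 3 :=
    ⟨cs.length / 3, cs.length % 3, by omega, by omega, rfl⟩
  have hn : ((cs.length : Int)) - PySem.Int.mod ((cs.length : Int)) 3 = 3 * (q : Int) := by
    rw [PySem.Int.mod_eq_emod_of_pos (by omega)]
    omega
  have hrange : PySem.List.pyRange 0 (3 * (q : Int)) 3 =
      (List.range q).map (fun k : Nat => ((3 * k : Nat) : Int)) := by
    rw [PySem.List.pyRange_of_pos 0 (3 * (q : Int)) (by omega)]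
    have hcount : (if (0 : Int) < 3 * (q : Int) then ((3 * (q : Int) - 0 + 3 - 1) / 3).toNat else 0) = q := by
      by_cases h : 0 < q
      · rw [if_pos (by exact_mod_cast by omega)]
        omega
      · rw [if_neg (by omega)]
        omega
    rw [hcount]
    apply List.map_congr_left
    intro k hk
    push_cast
    ring
  rw [hn, hrange, List.map_map, ← rangeMap_eq cs, ← hqdiv]
  apply List.map_congr_left
  intro k hk
  simp only [Function.comp_apply]
  rw [PySem.List.slice_toNat cs (by positivity) (by positivity)]
  have h1 : (((3 * k : Nat) : Int) + 3).toNat - (((3 * k : Nat) : Int)).toNat = 3 := by omega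
  have h2 : (((3 * k : Nat) : Int)).toNat = 3 * k := by omega
  rw [h1, h2]

lemma alt_eq_chunk3 (arn : String) : arn_to_codons_alt arn = chunk3 arn.toList := by
  have halt : arn_to_codons_alt arn =
      (PySem.List.pyRange 0 ((arn.toList.length : Int) - PySem.Int.mod (arn.toList.length : Int) 3) 3).map
        (fun i => String.ofList (PySem.List.slice arn.toList (some i) (some (i + 3)))) := rfl
  rw [halt, altList_eq]

theorem arn_to_codons_spec : Claim_equal_arn_to_codons := by
  intro arn _
  unfold Spec_arn_to_codons
  rw [alt_eq_chunk3]
  unfold arn_to_codons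
  rw [foldA_eq arn.toList []]
  simp
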